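-- pv_equiv track=rewrite | github.com/symaeng98/Algorithm | 프로그래머스/연습문제/최고의 집합 (판단력).py | solution
-- ===== SOURCE A (Python) =====
-- def solution(n, s):
--     answer = [1]*n
--     cnt = s-n
--     if cnt < 0:
--         return [-1]
--     a = cnt//n
--     b = cnt%n
--     for i in range(n):
--         answer[i] += a
--
--     for i in range(b):
--         answer[n-1-i] += 1
--
--     return answer
-- ===== SOURCE B (Python) =====
-- def solution(n, s):
--     if s < n:
--         return [-1]
--     answer = []
--     rem = s
--     k = n
--     while k > 0:
--         q = rem // k
--         answer.append(q)
--         rem -= q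
--         k -= 1
--     return answer
-- ===== Notes on version B (the rewrite author's own statement) =====
-- stated objective: alternative
-- what changed: B replaces A's one-shot divmod arithmetic (base [1]*n plus two additive index passes) with a greedy sequential fair-division loop: for k = n down to 1 it emits rem//k and subtracts it from the remaining sum, never computing a quotient/remainder pair of s and n at all.
import Mathlib
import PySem

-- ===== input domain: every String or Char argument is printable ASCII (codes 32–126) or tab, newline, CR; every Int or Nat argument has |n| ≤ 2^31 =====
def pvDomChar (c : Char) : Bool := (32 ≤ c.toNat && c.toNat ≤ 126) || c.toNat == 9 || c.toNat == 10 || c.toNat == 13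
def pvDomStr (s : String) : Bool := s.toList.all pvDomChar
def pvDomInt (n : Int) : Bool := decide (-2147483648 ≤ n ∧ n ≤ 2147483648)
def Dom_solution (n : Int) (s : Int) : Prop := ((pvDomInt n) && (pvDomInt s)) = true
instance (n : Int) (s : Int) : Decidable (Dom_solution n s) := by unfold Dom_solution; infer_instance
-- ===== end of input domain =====

-- B: a greedy sequential fair-division loop (emit rem//k for k = n..1, subtracting as it goes)
-- instead of A's [1]*n base plus two divmod-driven additive passes; same O(n) cost.


-- ===== PORT A =====
-- indices in both loops are always in range in Python, so pyGetD/pySetD are exact here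
def solution (n : Int) (s : Int) : List Int :=
  let answer : List Int := List.replicate n.toNat 1
  let cnt := s - n
  if cnt < 0 then [-1]
  else
    let a := PySem.Int.floordiv cnt n
    let b := PySem.Int.mod cnt n
    let answer := (PySem.List.pyRange 0 n 1).foldl
      (fun ans i => PySem.List.pySetD ans i (PySem.List.pyGetD ans i 0 + a)) answer
    let answer := (PySem.List.pyRange 0 b 1).foldl
      (fun ans i => PySem.List.pySetD ans (n - 1 - i) (PySem.List.pyGetD ans (n - 1 - i) 0 + 1)) answer
    answer

-- ===== PORT B =====
-- the while loop 'while k > 0: q = rem//k; append q; rem -= q; k -= 1' decrements k by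
-- exactly 1 each turn, so it runs exactly n.toNat times; the fuel argument encodes that
-- (for n ≤ 0 the loop body never runs, matching fuel 0).
def solutionAltLoop : Nat → Int → Int → List Int
  | 0, _, _ => []
  | fuel + 1, rem, k =>
    let q := PySem.Int.floordiv rem k
    q :: solutionAltLoop fuel (rem - q) (k - 1)

def solution_alt (n : Int) (s : Int) : List Int :=
  if s < n then [-1]
  else solutionAltLoop n.toNat s n

-- ===== PRECONDITION & SPEC =====
-- Pre_ excludes only n = 0 with n ≤ s, where A raises ZeroDivisionError (cnt//n)
def Pre_solution (n : Int) (s : Int) : Prop := ¬ (n = 0 ∧ n ≤ s)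
instance (n : Int) (s : Int) : Decidable (Pre_solution n s) := by unfold Pre_solution; infer_instance
def pvWitness_solution : Int × Int := (3, 14)
def Spec_solution (n : Int) (s : Int) (out : List Int) : Prop := out = solution_alt n s
instance (n : Int) (s : Int) (out : List Int) : Decidable (Spec_solution n s out) := by unfold Spec_solution; infer_instance

-- ===== CLAIM (what is proved, stated in full; the proofs are below) =====
def Claim_equal_solution : Prop := ∀ (n : Int) (s : Int), Dom_solution n s → Pre_solution n s → Spec_solution n s (solution n s)

-- ===== LEMMAS AND PROOFS =====

theorem loop1 (a c : Int) (N : Nat) (m : Nat) (hm : m ≤ N) :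
    (PySem.List.pyRange 0 (m : Int) 1).foldl
      (fun ans i => PySem.List.pySetD ans i (PySem.List.pyGetD ans i 0 + a))
      (List.replicate N c)
    = List.replicate m (c + a) ++ List.replicate (N - m) c := by
  induction m with
  | zero => simp [PySem.List.pyRange_one_eq_nil]
  | succ m ih =>
    have hm' : m ≤ N := Nat.le_of_succ_le hm
    have hsplit : PySem.List.pyRange 0 ((m + 1 : Nat) : Int) 1
        = PySem.List.pyRange 0 (m : Int) 1 ++ [(m : Int)] := by
      have := PySem.List.pyRange_one_succ_right (a := 0) (b := (m : Int)) (by exact_mod_cast Nat.zero_le m)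
      push_cast
      simpa using this
    rw [hsplit, List.foldl_append, ih hm']
    simp only [List.foldl_cons, List.foldl_nil]
    have hrep : List.replicate (N - m) c = c :: List.replicate (N - m - 1) c := by
      rw [show N - m = (N - m - 1) + 1 from by omega, List.replicate_succ]
      simp
    rw [hrep]
    have hget : PySem.List.pyGetD (List.replicate m (c + a) ++ (c :: List.replicate (N - m - 1) c)) (m : Int) 0 = c := by
      rw [PySem.List.pyGetD_natCast, List.getD_eq_getElem?_getD,
          List.getElem?_append_right (by simp)]
      simp
    rw [hget, PySem.List.pySetD_natCast]
    rw [List.set_append]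
    simp [List.replicate_succ' (n := m), show N - (m + 1) = N - m - 1 from by omega]

theorem loop2 (q : Int) (N b : Nat) (hb : b ≤ N) :
    (PySem.List.pyRange 0 (b : Int) 1).foldl
      (fun ans i => PySem.List.pySetD ans ((N : Int) - 1 - i) (PySem.List.pyGetD ans ((N : Int) - 1 - i) 0 + 1))
      (List.replicate N q)
    = List.replicate (N - b) q ++ List.replicate b (q + 1) := by
  induction b with
  | zero => simp [PySem.List.pyRange_one_eq_nil]
  | succ b ih =>
    have hb' : b ≤ N := Nat.le_of_succ_le hb
    have hsplit : PySem.List.pyRange 0 ((b + 1 : Nat) : Int) 1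
        = PySem.List.pyRange 0 (b : Int) 1 ++ [(b : Int)] := by
      have := PySem.List.pyRange_one_succ_right (a := 0) (b := (b : Int)) (by exact_mod_cast Nat.zero_le b)
      push_cast
      simpa using this
    rw [hsplit, List.foldl_append, ih hb']
    simp only [List.foldl_cons, List.foldl_nil]
    have hidx : (N : Int) - 1 - (b : Int) = ((N - 1 - b : Nat) : Int) := by
      push_cast [Nat.cast_sub (by omega : b ≤ N - 1), Nat.cast_sub (by omega : 1 ≤ N)]
      ring
    have hrep : List.replicate (N - b) q = List.replicate (N - 1 - b) q ++ (q :: List.replicate 0 q) := by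
      have : N - b = (N - 1 - b) + 1 := by omega
      rw [this, List.replicate_succ']
      simp
    rw [hidx, hrep]
    have hget : PySem.List.pyGetD ((List.replicate (N - 1 - b) q ++ (q :: List.replicate 0 q)) ++ List.replicate b (q + 1)) ((N - 1 - b : Nat) : Int) 0 = q := by
      rw [PySem.List.pyGetD_natCast, List.getD_eq_getElem?_getD,
          List.getElem?_append_left (by simp),
          List.getElem?_append_right (by simp)]
      simp
    rw [hget, PySem.List.pySetD_natCast]
    rw [List.set_append]
    simp [show N - (b + 1) = N - 1 - b from by omega, List.replicate_succ]

-- B's greedy loop on rem = N*q + r (0 ≤ r < N) produces q's then (q+1)'s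
theorem loopB (N : Nat) (q r : Int) (h0 : 0 ≤ r) (hr : r < (N : Int)) :
    solutionAltLoop N ((N : Int) * q + r) (N : Int)
    = List.replicate (N - r.toNat) q ++ List.replicate r.toNat (q + 1) := by
  induction N generalizing q r with
  | zero => exact absurd hr (by omega)
  | succ m ih =>
    have hN : (0 : Int) < ((m + 1 : Nat) : Int) := by exact_mod_cast Nat.succ_pos m
    have hq : PySem.Int.floordiv (((m + 1 : Nat) : Int) * q + r) ((m + 1 : Nat) : Int) = q := by
      rw [PySem.Int.floordiv_eq_ediv_of_pos hN, Int.mul_comm, Int.add_comm,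
          Int.add_mul_ediv_right _ _ (by omega : ((m + 1 : Nat) : Int) ≠ 0),
          Int.ediv_eq_zero_of_lt h0 hr]
      ring
    simp only [solutionAltLoop, hq]
    have hrem : ((m + 1 : Nat) : Int) * q + r - q = (m : Int) * q + r := by push_cast; ring
    have hk : ((m + 1 : Nat) : Int) - 1 = (m : Int) := by push_cast; ring
    rw [hrem, hk]
    by_cases hlt : r < (m : Int)
    · rw [ih q r h0 hlt]
      have : (m + 1) - r.toNat = ((m - r.toNat) + 1) := by omega
      rw [this, List.replicate_succ]
      simp
    · -- r = m
      have hrm : r = (m : Int) := by omega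
      by_cases hm : m = 0
      · subst hm
        simp [solutionAltLoop, hrm, List.replicate_succ]
      · have hrw : (m : Int) * q + r = (m : Int) * (q + 1) + 0 := by rw [hrm]; ring
        rw [hrw, ih (q + 1) 0 le_rfl (by exact_mod_cast Nat.pos_of_ne_zero hm)]
        have h1 : r.toNat = m := by omega
        simp [h1, List.replicate_succ]

-- ===== VERDICT (by name: the statement is the Claim_ definition above) =====
theorem solution_spec : Claim_equal_solution := by
  intro n s _ hpre
  unfold Spec_solution solution solution_alt Pre_solution at *
  by_cases hlt : s - n < 0
  · rw [if_pos hlt, if_pos (by omega : s < n)]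
  · rw [if_neg hlt, if_neg (by omega : ¬ s < n)]
    dsimp only
    rcases lt_trichotomy n 0 with hn | hn | hn
    · -- n < 0: both sides are the empty list
      have hmb := PySem.Int.mod_neg_bounds (a := s - n) (b := n) hn
      rw [PySem.List.pyRange_one_eq_nil (by omega : n ≤ 0),
          PySem.List.pyRange_one_eq_nil (by omega : PySem.Int.mod (s - n) n ≤ 0)]
      simp only [List.foldl_nil]
      rw [show n.toNat = 0 from by omega]
      simp [solutionAltLoop]
    · exact absurd ⟨hn, by omega⟩ hpre
    · -- n > 0
      have ha : PySem.Int.floordiv (s - n) n = PySem.Int.floordiv s n - 1 := by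
        rw [PySem.Int.floordiv_eq_ediv_of_pos hn, PySem.Int.floordiv_eq_ediv_of_pos hn,
            show s - n = s + -1 * n from by ring,
            Int.add_mul_ediv_right _ _ (by omega : n ≠ 0)]
        ring
      have hb : PySem.Int.mod (s - n) n = PySem.Int.mod s n := by
        rw [PySem.Int.mod_eq_emod_of_pos hn, PySem.Int.mod_eq_emod_of_pos hn]
        exact Int.sub_emod_right s n
      have hr0 : 0 ≤ PySem.Int.mod s n := PySem.Int.mod_nonneg (a := s) (b := n) hn
      have hrn : PySem.Int.mod s n < n := PySem.Int.mod_lt (a := s) (b := n) hn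
      rw [hb, ha]
      rw [show n = ((n.toNat : Nat) : Int) from by omega]
      simp only [Int.toNat_natCast]
      rw [loop1 (PySem.Int.floordiv s ((n.toNat : Nat) : Int) - 1) 1 n.toNat n.toNat le_rfl]
      simp only [Nat.sub_self, List.replicate_zero, List.append_nil]
      rw [show 1 + (PySem.Int.floordiv s ((n.toNat : Nat) : Int) - 1)
            = PySem.Int.floordiv s ((n.toNat : Nat) : Int) from by ring]
      have hr0' : 0 ≤ PySem.Int.mod s ((n.toNat : Nat) : Int) := by
        rw [show ((n.toNat : Nat) : Int) = n from by omega]; exact hr0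
      have hrn' : PySem.Int.mod s ((n.toNat : Nat) : Int) < ((n.toNat : Nat) : Int) := by
        rw [show ((n.toNat : Nat) : Int) = n from by omega]; exact hrn
      rw [show PySem.Int.mod s ((n.toNat : Nat) : Int)
            = (((PySem.Int.mod s ((n.toNat : Nat) : Int)).toNat : Nat) : Int) from by omega]
      rw [loop2 (PySem.Int.floordiv s ((n.toNat : Nat) : Int)) n.toNat
            (PySem.Int.mod s ((n.toNat : Nat) : Int)).toNat (by omega)]
      -- B side: rewrite s as n*q + r and apply loopB
      have hdm : s = ((n.toNat : Nat) : Int) * PySem.Int.floordiv s ((n.toNat : Nat) : Int)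
            + PySem.Int.mod s ((n.toNat : Nat) : Int) := by
        rw [PySem.Int.floordiv_eq_ediv_of_pos (by omega : (0:Int) < ((n.toNat : Nat) : Int)),
            PySem.Int.mod_eq_emod_of_pos (by omega : (0:Int) < ((n.toNat : Nat) : Int))]
        exact (Int.mul_ediv_add_emod s _).symm
      rw [show solutionAltLoop n.toNat s ((n.toNat : Nat) : Int)
            = solutionAltLoop n.toNat (((n.toNat : Nat) : Int) * PySem.Int.floordiv s ((n.toNat : Nat) : Int)
                + PySem.Int.mod s ((n.toNat : Nat) : Int)) ((n.toNat : Nat) : Int) from by rw [← hdm],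
          loopB n.toNat _ _ hr0' hrn']
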